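-- pv_equiv track=rewrite | github.com/alioosta42-lang/NEWREP | 39_file.py | gregorian_to_shamsi
-- ===== SOURCE A (Python) =====
-- def gregorian_to_shamsi(g_y, g_m, g_d):
--     gy = g_y - 1600
--     gm = g_m - 1
--     gd = g_d - 1
--
--     g_day_no = 365*gy + gy//4 - gy//100 + gy//400
--     for i in range(gm):
--         g_day_no += [31,28,31,30,31,30,31,31,30,31,30,31][i]
--     g_day_no += gd
--
--     j_day_no = g_day_no - 79
--
--     j_np = j_day_no // 12053
--     j_day_no %= 12053
--
--     jy = 979 + 33*j_np + 4*(j_day_no//1461)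
--     j_day_no %= 1461
--
--     if j_day_no >= 366:
--         jy += (j_day_no - 366)//365
--         j_day_no = (j_day_no - 366)%365
--
--     jm_list = [31,31,31,31,31,31,30,30,30,30,30,29]
--     jm = 0
--     while jm < 11 and j_day_no >= jm_list[jm]:
--         j_day_no -= jm_list[jm]
--         jm += 1
--     jd = j_day_no + 1
--
--     return jy, jm + 1, jd
-- ===== SOURCE B (Python) =====
-- _CUM_G = (0, 31, 59, 90, 120, 151, 181, 212, 243, 273, 304, 334)
--
-- def gregorian_to_shamsi(g_y, g_m, g_d):
--     gy = g_y - 1600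
--     g_day_no = (365*gy + gy//4 - gy//100 + gy//400
--                 + (_CUM_G[g_m - 1] if g_m >= 1 else 0)
--                 + (g_d - 1))
--     j = g_day_no - 79
--     j_np, j = divmod(j, 12053)
--     jy = 979 + 33*j_np + 4*(j // 1461)
--     j %= 1461
--     if j >= 366:
--         jy += (j - 366) // 365
--         j = (j - 366) % 365
--     if j < 186:
--         jm, jd = j // 31, j % 31 + 1
--     else:
--         r = j - 186
--         jm, jd = 6 + r // 30, r % 30 + 1
--     return jy, jm + 1, jd
-- ===== Notes on version B (the rewrite author's own statement) =====
-- stated objective: simpler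
-- what changed: A's Gregorian month-summing for-loop is replaced by a single lookup into a precomputed cumulative-days table, and A's Jalali month while-loop is replaced by a closed-form division split (j//31 before day 186, 6+(j-186)//30 after); the cycle arithmetic is kept.
-- outside the precondition, e.g. on gregorian_to_shamsi(2000, 13, 1): A returns (1379, 10, 11), B raises IndexError
import Mathlib
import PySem

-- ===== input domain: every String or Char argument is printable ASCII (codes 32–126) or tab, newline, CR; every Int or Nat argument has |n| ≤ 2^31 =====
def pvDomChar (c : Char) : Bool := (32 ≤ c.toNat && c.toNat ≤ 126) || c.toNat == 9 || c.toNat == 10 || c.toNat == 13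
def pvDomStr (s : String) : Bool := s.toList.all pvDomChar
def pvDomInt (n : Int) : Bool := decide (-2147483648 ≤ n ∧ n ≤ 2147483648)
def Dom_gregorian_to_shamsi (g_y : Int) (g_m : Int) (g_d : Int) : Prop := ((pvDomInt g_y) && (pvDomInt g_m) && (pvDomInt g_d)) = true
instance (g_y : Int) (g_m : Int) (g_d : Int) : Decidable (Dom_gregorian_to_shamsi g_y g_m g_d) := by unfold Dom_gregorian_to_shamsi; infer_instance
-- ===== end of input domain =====

set_option maxHeartbeats 2000000

-- B replaces A's month-summing for-loop by a cumulative-offset table and A's Jalali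
-- while-loop by a closed-form division split; the objective is a simpler function.

-- ===== PORT A =====
def pvGMonths : List Int := [31,28,31,30,31,30,31,31,30,31,30,31]
def pvJMonths : List Int := [31,31,31,31,31,31,30,30,30,30,30,29]

-- the 'while jm < 11 and j_day_no >= jm_list[jm]' loop, walking down the month list
def pvJLoop : List Int → Int → Int → Int × Int
  | [], jm, j => (jm, j)
  | d :: rest, jm, j =>
      if jm < 11 ∧ j ≥ d then pvJLoop rest (jm + 1) (j - d) else (jm, j)

def gregorian_to_shamsi (g_y : Int) (g_m : Int) (g_d : Int) : Int × Int × Int :=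
  let gy := g_y - 1600
  let gm := g_m - 1
  let gd := g_d - 1
  let base := 365*gy + PySem.Int.floordiv gy 4 - PySem.Int.floordiv gy 100 + PySem.Int.floordiv gy 400
  -- for i in range(gm): the list index i = 12 that raises IndexError is excluded by Pre_
  let g_day_no := (PySem.List.pyRange 0 gm 1).foldl
      (fun acc i => acc + PySem.List.pyGetD pvGMonths i 0) base
  let g_day_no := g_day_no + gd
  let j_day_no := g_day_no - 79
  let j_np := PySem.Int.floordiv j_day_no 12053
  let j_day_no := PySem.Int.mod j_day_no 12053
  let jy := 979 + 33*j_np + 4*(PySem.Int.floordiv j_day_no 1461)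
  let j_day_no := PySem.Int.mod j_day_no 1461
  let p := if j_day_no ≥ 366 then
      (jy + PySem.Int.floordiv (j_day_no - 366) 365, PySem.Int.mod (j_day_no - 366) 365)
    else (jy, j_day_no)
  let q := pvJLoop pvJMonths 0 p.2
  (p.1, q.1 + 1, q.2 + 1)

-- ===== PORT B =====
def pvCumG : List Int := [0,31,59,90,120,151,181,212,243,273,304,334]

def gregorian_to_shamsi_alt (g_y : Int) (g_m : Int) (g_d : Int) : Int × Int × Int :=
  let gy := g_y - 1600
  let g_day_no := (365*gy + PySem.Int.floordiv gy 4 - PySem.Int.floordiv gy 100 + PySem.Int.floordiv gy 400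
      + (if g_m ≥ 1 then PySem.List.pyGetD pvCumG (g_m - 1) 0 else 0))  -- _CUM_G[g_m-1]; index 12 (raising) excluded by Pre_
      + (g_d - 1)
  let j0 := g_day_no - 79
  let j_np := PySem.Int.floordiv j0 12053
  let j1 := PySem.Int.mod j0 12053
  let jy := 979 + 33*j_np + 4*(PySem.Int.floordiv j1 1461)
  let j2 := PySem.Int.mod j1 1461
  let p := if j2 ≥ 366 then
      (jy + PySem.Int.floordiv (j2 - 366) 365, PySem.Int.mod (j2 - 366) 365)
    else (jy, j2)
  let j := p.2
  let mr := if j < 186 then (PySem.Int.floordiv j 31, PySem.Int.mod j 31 + 1)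
    else (6 + PySem.Int.floordiv (j - 186) 30, PySem.Int.mod (j - 186) 30 + 1)
  (p.1, mr.1 + 1, mr.2)

-- ===== PRECONDITION & SPEC =====
-- Pre_ excludes g_m ≥ 13: for g_m ≥ 14 A raises IndexError, and at g_m = 13 A's value
-- (a thirteenth "month" produced by summing all twelve month lengths) is an artefact of
-- its loop on which B's 12-entry cumulative table naturally raises IndexError.
def Pre_gregorian_to_shamsi (g_y : Int) (g_m : Int) (g_d : Int) : Prop := g_m ≤ 12
instance (g_y : Int) (g_m : Int) (g_d : Int) : Decidable (Pre_gregorian_to_shamsi g_y g_m g_d) := by unfold Pre_gregorian_to_shamsi; infer_instance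
def pvWitness_gregorian_to_shamsi : Int × Int × Int := (2024, 3, 20)

def Spec_gregorian_to_shamsi (g_y : Int) (g_m : Int) (g_d : Int) (out : Int × Int × Int) : Prop := out = gregorian_to_shamsi_alt g_y g_m g_d
instance (g_y : Int) (g_m : Int) (g_d : Int) (out : Int × Int × Int) : Decidable (Spec_gregorian_to_shamsi g_y g_m g_d out) := by unfold Spec_gregorian_to_shamsi; infer_instance

-- ===== CLAIM (what is proved, stated in full; the proofs are below) =====
def Claim_equal_gregorian_to_shamsi : Prop := ∀ (g_y : Int) (g_m : Int) (g_d : Int), Dom_gregorian_to_shamsi g_y g_m g_d → Pre_gregorian_to_shamsi g_y g_m g_d → Spec_gregorian_to_shamsi g_y g_m g_d (gregorian_to_shamsi g_y g_m g_d)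

-- ===== LEMMAS AND PROOFS =====

-- the shared middle of both pipelines: day number X ↦ (jy, residual day-of-year)
def pvMid (X : Int) : Int × Int :=
  if PySem.Int.mod (PySem.Int.mod (X - 79) 12053) 1461 ≥ 366 then
    (979 + 33*(PySem.Int.floordiv (X - 79) 12053)
       + 4*(PySem.Int.floordiv (PySem.Int.mod (X - 79) 12053) 1461)
       + PySem.Int.floordiv (PySem.Int.mod (PySem.Int.mod (X - 79) 12053) 1461 - 366) 365,
     PySem.Int.mod (PySem.Int.mod (PySem.Int.mod (X - 79) 12053) 1461 - 366) 365)
  else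
    (979 + 33*(PySem.Int.floordiv (X - 79) 12053)
       + 4*(PySem.Int.floordiv (PySem.Int.mod (X - 79) 12053) 1461),
     PySem.Int.mod (PySem.Int.mod (X - 79) 12053) 1461)

-- B's closed-form month split
def pvMr (j : Int) : Int × Int :=
  if j < 186 then (PySem.Int.floordiv j 31, PySem.Int.mod j 31 + 1)
  else (6 + PySem.Int.floordiv (j - 186) 30, PySem.Int.mod (j - 186) 30 + 1)

theorem pvMid_snd_bounds (X : Int) : 0 ≤ (pvMid X).2 ∧ (pvMid X).2 ≤ 365 := by
  unfold pvMid
  have h1 : 0 ≤ PySem.Int.mod (X - 79) 12053 ∧ PySem.Int.mod (X - 79) 12053 < 12053 := by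
    rw [PySem.Int.mod_eq_emod_of_pos (by omega)]; omega
  have h2 : 0 ≤ PySem.Int.mod (PySem.Int.mod (X - 79) 12053) 1461
      ∧ PySem.Int.mod (PySem.Int.mod (X - 79) 12053) 1461 < 1461 := by
    rw [PySem.Int.mod_eq_emod_of_pos (by omega)]; omega
  split_ifs with hc
  · have h3 : 0 ≤ PySem.Int.mod (PySem.Int.mod (PySem.Int.mod (X - 79) 12053) 1461 - 366) 365
        ∧ PySem.Int.mod (PySem.Int.mod (PySem.Int.mod (X - 79) 12053) 1461 - 366) 365 < 365 := by
      rw [PySem.Int.mod_eq_emod_of_pos (by omega)]; omega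
    exact ⟨h3.1, by omega⟩
  · exact ⟨h2.1, by omega⟩

-- A's while-loop agrees with B's closed-form split on the residual range 0..365
theorem pv_month_pair (j : Int) (h0 : 0 ≤ j) (h1 : j ≤ 365) :
    ((pvJLoop pvJMonths 0 j).1 + 1, (pvJLoop pvJMonths 0 j).2 + 1)
      = ((pvMr j).1 + 1, (pvMr j).2) := by
  obtain ⟨n, rfl⟩ := Int.eq_ofNat_of_zero_le h0
  have hn : n ≤ 365 := by exact_mod_cast h1
  interval_cases n <;> decide

-- A's Gregorian month-offset loop, from any accumulator, equals B's table lookup (for g_m ≤ 12)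
theorem pv_offset_eq (gm : Int) (h : gm ≤ 12) :
    (PySem.List.pyRange 0 (gm - 1) 1).foldl
      (fun acc i => acc + PySem.List.pyGetD pvGMonths i 0) 0
    = (if gm ≥ 1 then PySem.List.pyGetD pvCumG (gm - 1) 0 else 0) := by
  by_cases h1 : gm ≥ 1
  · rw [if_pos h1]
    obtain ⟨n, rfl⟩ : ∃ n : Nat, gm = (n : Int) := ⟨gm.toNat, by omega⟩
    have hn1 : 1 ≤ n := by exact_mod_cast h1
    have hn : n ≤ 12 := by exact_mod_cast h
    interval_cases n <;> decide
  · rw [if_neg h1, PySem.List.pyRange_one_eq_nil (by omega)]; rfl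

theorem pv_offset_fold (gm init : Int) (h : gm ≤ 12) :
    (PySem.List.pyRange 0 (gm - 1) 1).foldl
      (fun acc i => acc + PySem.List.pyGetD pvGMonths i 0) init
    = init + (if gm ≥ 1 then PySem.List.pyGetD pvCumG (gm - 1) 0 else 0) := by
  have hf := PySem.List.foldl_add (PySem.List.pyRange 0 (gm - 1) 1)
      (fun i => PySem.List.pyGetD pvGMonths i 0) init
  have h0 := PySem.List.foldl_add (PySem.List.pyRange 0 (gm - 1) 1)
      (fun i => PySem.List.pyGetD pvGMonths i 0) 0
  have he := pv_offset_eq gm h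
  simp only at hf h0
  rw [hf]
  rw [h0, zero_add] at he
  omega

theorem gregorian_to_shamsi_eq (g_y g_m g_d : Int) (hpre : g_m ≤ 12) :
    gregorian_to_shamsi g_y g_m g_d = gregorian_to_shamsi_alt g_y g_m g_d := by
  have hA : gregorian_to_shamsi g_y g_m g_d =
      ((pvMid ((PySem.List.pyRange 0 (g_m - 1) 1).foldl
          (fun acc i => acc + PySem.List.pyGetD pvGMonths i 0)
          (365*(g_y - 1600) + PySem.Int.floordiv (g_y - 1600) 4
            - PySem.Int.floordiv (g_y - 1600) 100 + PySem.Int.floordiv (g_y - 1600) 400)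
          + (g_d - 1))).1,
       (pvJLoop pvJMonths 0 (pvMid ((PySem.List.pyRange 0 (g_m - 1) 1).foldl
          (fun acc i => acc + PySem.List.pyGetD pvGMonths i 0)
          (365*(g_y - 1600) + PySem.Int.floordiv (g_y - 1600) 4
            - PySem.Int.floordiv (g_y - 1600) 100 + PySem.Int.floordiv (g_y - 1600) 400)
          + (g_d - 1))).2).1 + 1,
       (pvJLoop pvJMonths 0 (pvMid ((PySem.List.pyRange 0 (g_m - 1) 1).foldl
          (fun acc i => acc + PySem.List.pyGetD pvGMonths i 0)
          (365*(g_y - 1600) + PySem.Int.floordiv (g_y - 1600) 4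
            - PySem.Int.floordiv (g_y - 1600) 100 + PySem.Int.floordiv (g_y - 1600) 400)
          + (g_d - 1))).2).2 + 1) := rfl
  have hB : gregorian_to_shamsi_alt g_y g_m g_d =
      ((pvMid ((365*(g_y - 1600) + PySem.Int.floordiv (g_y - 1600) 4
            - PySem.Int.floordiv (g_y - 1600) 100 + PySem.Int.floordiv (g_y - 1600) 400
            + (if g_m ≥ 1 then PySem.List.pyGetD pvCumG (g_m - 1) 0 else 0)) + (g_d - 1))).1,
       (pvMr (pvMid ((365*(g_y - 1600) + PySem.Int.floordiv (g_y - 1600) 4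
            - PySem.Int.floordiv (g_y - 1600) 100 + PySem.Int.floordiv (g_y - 1600) 400
            + (if g_m ≥ 1 then PySem.List.pyGetD pvCumG (g_m - 1) 0 else 0)) + (g_d - 1))).2).1 + 1,
       (pvMr (pvMid ((365*(g_y - 1600) + PySem.Int.floordiv (g_y - 1600) 4
            - PySem.Int.floordiv (g_y - 1600) 100 + PySem.Int.floordiv (g_y - 1600) 400
            + (if g_m ≥ 1 then PySem.List.pyGetD pvCumG (g_m - 1) 0 else 0)) + (g_d - 1))).2).2) := rfl
  rw [hA, hB, pv_offset_fold g_m _ hpre]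
  have hb := pvMid_snd_bounds ((365*(g_y - 1600) + PySem.Int.floordiv (g_y - 1600) 4
      - PySem.Int.floordiv (g_y - 1600) 100 + PySem.Int.floordiv (g_y - 1600) 400
      + (if g_m ≥ 1 then PySem.List.pyGetD pvCumG (g_m - 1) 0 else 0)) + (g_d - 1))
  have hm := pv_month_pair _ hb.1 hb.2
  rw [Prod.mk.injEq] at hm
  rw [hm.1, hm.2]

-- ===== VERDICT (by name: the statement is the Claim_ definition above) =====
theorem gregorian_to_shamsi_spec : Claim_equal_gregorian_to_shamsi := by
  intro g_y g_m g_d _ hpre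
  unfold Spec_gregorian_to_shamsi
  exact gregorian_to_shamsi_eq g_y g_m g_d hpre
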